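-- pv_equiv track=rewrite | github.com/pypi-data/pypi-mirror-72 | packages/botlib/botlib-87.tar.gz/botlib-87/bot/obj.py | search
-- ===== SOURCE A (Python) =====
-- def search(o, match=None):
--     res = False
--     if match is None:
--         return res
--     for key, value in match.items():
--         val = o.get(key, None)
--         if val:
--             if not value:
--                 res = True
--                 continue
--             if value in str(val):
--                 res = True
--                 continue
--             res = False
--             break
--     return res
-- ===== SOURCE B (Python) =====
-- def search(o, match=None):
--     if match is None:
--         return False
--     relevant = sum(1 for k in match if o.get(k, None))
--     passing = sum(1 for k, v in match.items()
--                   if o.get(k, None) and ((not v) or (v in str(o.get(k, None)))))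
--     return relevant > 0 and relevant == passing
-- ===== Notes on version B (the rewrite author's own statement) =====
-- stated objective: alternative
-- what changed: Replaces A's stateful flag/continue/break loop with two staged counting passes (number of keys with a truthy o.get, and number of those whose value is empty or a substring) and a final arithmetic comparison relevant > 0 and relevant == passing.
import Mathlib
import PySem

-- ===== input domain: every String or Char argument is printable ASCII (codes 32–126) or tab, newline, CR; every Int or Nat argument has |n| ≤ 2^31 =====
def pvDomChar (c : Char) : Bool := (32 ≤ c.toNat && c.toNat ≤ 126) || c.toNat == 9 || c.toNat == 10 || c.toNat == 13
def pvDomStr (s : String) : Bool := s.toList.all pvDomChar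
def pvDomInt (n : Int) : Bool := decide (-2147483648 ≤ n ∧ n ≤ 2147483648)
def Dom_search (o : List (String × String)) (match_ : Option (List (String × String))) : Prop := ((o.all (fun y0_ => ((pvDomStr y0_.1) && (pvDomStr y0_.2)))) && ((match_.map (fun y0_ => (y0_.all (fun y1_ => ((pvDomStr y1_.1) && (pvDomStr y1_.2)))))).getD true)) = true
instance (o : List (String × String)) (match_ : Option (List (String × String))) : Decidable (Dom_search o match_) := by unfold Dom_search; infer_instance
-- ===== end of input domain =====

-- B replaces A's flag/continue/break loop with two counting passes (relevant keys, passing relevant keys) and an arithmetic comparison (alternative decomposition, same cost).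
-- ===== PORT A =====
-- the 'for key, value in match.items()' loop of A, carrying res; 'break' returns False (res was just set to False)
def searchLoop (o : List (String × String)) : List (String × String) → Bool → Bool
  | [], res => res
  | (key, value) :: rest, res =>
    match PySem.Dict.get? ⟨o⟩ key with
    | none => searchLoop o rest res
    | some val =>
      if val = "" then searchLoop o rest res          -- 'if val:' false → loop continues
      else if value = "" then searchLoop o rest true  -- 'if not value: res = True; continue'
      else if PySem.Str.isIn value val then searchLoop o rest true  -- 'if value in str(val)'
      else false                                       -- 'res = False; break; return res'

def search (o : List (String × String)) (match_ : Option (List (String × String))) : Bool :=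
  match match_ with
  | none => false
  | some m => searchLoop o m false

-- ===== PORT B =====
-- truthiness of o.get(k, None): a found, non-empty string
def relTest (o : List (String × String)) (kv : String × String) : Bool :=
  ((PySem.Dict.get? ⟨o⟩ kv.1).getD "") ≠ ""

-- 'o.get(k, None) and ((not v) or (v in str(o.get(k, None))))' of the second generator
def okTest (o : List (String × String)) (kv : String × String) : Bool :=
  relTest o kv && (kv.2 = "" || PySem.Str.isIn kv.2 ((PySem.Dict.get? ⟨o⟩ kv.1).getD ""))

def search_alt (o : List (String × String)) (match_ : Option (List (String × String))) : Bool :=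
  match match_ with
  | none => false
  | some m =>
    let relevant := m.countP (relTest o)   -- sum(1 for k in match if o.get(k, None))
    let passing := m.countP (okTest o)     -- sum(1 for k, v in match.items() if …)
    decide (0 < relevant) && (relevant == passing)

-- ===== PRECONDITION & SPEC =====
def Spec_search (o : List (String × String)) (match_ : Option (List (String × String))) (out : Bool) : Prop := out = search_alt o match_
instance (o : List (String × String)) (match_ : Option (List (String × String))) (out : Bool) : Decidable (Spec_search o match_ out) := by unfold Spec_search; infer_instance

-- ===== CLAIM (what is proved, stated in full; the proofs are below) =====
def Claim_equal_search : Prop := ∀ (o : List (String × String)) (match_ : Option (List (String × String))), Dom_search o match_ → Spec_search o match_ (search o match_)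

-- ===== LEMMAS AND PROOFS =====
-- every pair counted by okTest is counted by relTest
theorem countP_ok_le_rel (o : List (String × String)) (m : List (String × String)) :
    m.countP (okTest o) ≤ m.countP (relTest o) := by
  apply List.countP_mono_left
  intro kv _ h
  simp only [okTest, Bool.and_eq_true] at h
  exact h.1

theorem beq_succ (a b : Nat) : (a + 1 == b + 1) = (a == b) := by
  cases hab : (a == b)
  · simp only [beq_eq_false_iff_ne, ne_eq] at hab ⊢
    omega
  · simp only [beq_iff_eq] at hab
    simp [hab]

-- A's loop equals: initial res if no relevant pair, else whether the two counts coincide.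
theorem searchLoop_eq (o : List (String × String)) (m : List (String × String)) (res : Bool) :
    searchLoop o m res =
      (if m.countP (relTest o) = 0 then res
       else (m.countP (relTest o) == m.countP (okTest o))) := by
  induction m generalizing res with
  | nil => simp [searchLoop]
  | cons kv rest ih =>
    obtain ⟨key, value⟩ := kv
    by_cases hrel : relTest o (key, value) = true
    · have hval : ((PySem.Dict.get? ⟨o⟩ key : Option String)).getD "" ≠ "" := by
        simpa [relTest] using hrel
      cases hget : (PySem.Dict.get? (⟨o⟩ : PySem.Dict String String) key) with
      | none => simp [hget] at hval
      | some val =>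
        have hv : val ≠ "" := by simpa [hget] using hval
        have hrelcnt : List.countP (relTest o) ((key, value) :: rest)
            = List.countP (relTest o) rest + 1 := by simp [hrel]
        by_cases hpass : value = "" ∨ PySem.Str.isIn value val = true
        · -- relevant and passing: loop continues with res := true, both counts grow
          have hok : okTest o (key, value) = true := by
            rcases hpass with h | h
            · subst h; simp [okTest, hrel]
            · have hC : PySem.Chars.isIn value.toList val.toList = true := by simpa using h
              simp [okTest, hrel, hget, hC]
          have hokcnt : List.countP (okTest o) ((key, value) :: rest)
              = List.countP (okTest o) rest + 1 := by simp [hok]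
          have hstep : searchLoop o ((key, value) :: rest) res = searchLoop o rest true := by
            simp only [searchLoop, hget]
            rw [if_neg hv]
            rcases hpass with h | h
            · rw [if_pos h]
            · by_cases h2 : value = ""
              · rw [if_pos h2]
              · rw [if_neg h2, if_pos h]
          rw [hstep, ih, hrelcnt, hokcnt]
          by_cases h0 : List.countP (relTest o) rest = 0
          · have hok0 : List.countP (okTest o) rest = 0 :=
              Nat.le_zero.mp (h0 ▸ countP_ok_le_rel o rest)
            simp [h0, hok0]
          · simp [h0, beq_succ]
        · -- relevant and failing: loop breaks with False; the counts must differ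
          have h2 : value ≠ "" := fun h => hpass (Or.inl h)
          have hin' : ¬ PySem.Str.isIn value val = true := fun h => hpass (Or.inr h)
          have hin : PySem.Str.isIn value val = false := by
            cases hi : PySem.Str.isIn value val
            · rfl
            · exact absurd hi hin'
          have hC : PySem.Chars.isIn value.toList val.toList = false := by simpa using hin
          have hok : okTest o (key, value) = false := by
            simp [okTest, hget, h2, hC]
          have hokcnt : List.countP (okTest o) ((key, value) :: rest)
              = List.countP (okTest o) rest := by simp [hok]
          have hstep : searchLoop o ((key, value) :: rest) res = false := by
            simp only [searchLoop, hget]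
            rw [if_neg hv, if_neg h2]
            simp [hC]
          have hle := countP_ok_le_rel o rest
          have hne : (List.countP (relTest o) rest + 1 == List.countP (okTest o) rest) = false := by
            simp only [beq_eq_false_iff_ne, ne_eq]
            omega
          rw [hstep, hrelcnt, hokcnt]
          simp [hne]
    · -- irrelevant: loop skips, neither count changes
      have hrel' : relTest o (key, value) = false := by simpa using hrel
      have hok' : okTest o (key, value) = false := by simp [okTest, hrel']
      have hstep : searchLoop o ((key, value) :: rest) res = searchLoop o rest res := by
        simp only [searchLoop]
        cases hget : (PySem.Dict.get? (⟨o⟩ : PySem.Dict String String) key) with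
        | none => rfl
        | some val =>
          have hv : val = "" := by
            by_contra hv
            exact hrel (by simp [relTest, hget, hv])
          simp [hv]
      rw [hstep, ih]
      have hc : List.countP (relTest o) ((key, value) :: rest) = List.countP (relTest o) rest := by
        simp [hrel']
      have hc2 : List.countP (okTest o) ((key, value) :: rest) = List.countP (okTest o) rest := by
        simp [hok']
      rw [hc, hc2]

-- ===== VERDICT (by name: the statement is the Claim_ definition above) =====
theorem search_spec : Claim_equal_search := by
  intro o match_ _
  unfold Spec_search
  cases match_ with
  | none => rfl
  | some m =>
    show searchLoop o m false = search_alt o (some m)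
    rw [searchLoop_eq o m false]
    by_cases h0 : List.countP (relTest o) m = 0
    · simp [search_alt, h0]
    · have hp : 0 < List.countP (relTest o) m := Nat.pos_of_ne_zero h0
      simp [search_alt, h0, hp]
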